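-- pv_equiv track=rewrite | github.com/posl/comment_recommendation | script/mod_gen/3_time/en/192_B/1.py | hard_to_read
-- ===== SOURCE A (Python) =====
-- def hard_to_read(s):
--     for i in range(0, len(s), 2):
--         if s[i].isupper():
--             return False
--     for i in range(1, len(s), 2):
--         if s[i].islower():
--             return False
--     return True
-- ===== SOURCE B (Python) =====
-- def hard_to_read(s):
--     for i, c in enumerate(s):
--         if i % 2 == 0:
--             if c.isupper():
--                 return False
--         elif c.islower():
--             return False
--     return True
-- ===== Notes on version B (the rewrite author's own statement) =====
-- stated objective: simpler
-- what changed: B replaces A's two sequential index-range scans (even indices for uppercase, then odd indices for lowercase) with a single enumerate pass that dispatches on index parity.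
import Mathlib
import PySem

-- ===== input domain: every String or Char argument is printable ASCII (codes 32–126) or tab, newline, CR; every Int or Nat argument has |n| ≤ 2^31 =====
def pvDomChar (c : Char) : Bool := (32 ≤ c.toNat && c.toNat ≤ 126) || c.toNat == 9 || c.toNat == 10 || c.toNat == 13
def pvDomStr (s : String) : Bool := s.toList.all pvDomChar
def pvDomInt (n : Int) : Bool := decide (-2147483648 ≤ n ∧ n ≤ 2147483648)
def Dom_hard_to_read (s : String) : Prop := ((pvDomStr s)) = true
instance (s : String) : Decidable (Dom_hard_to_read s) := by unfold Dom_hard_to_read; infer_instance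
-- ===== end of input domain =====

-- B replaces A's two sequential index-range scans with a single enumerate pass dispatching on index parity (simpler, same value).


-- ===== PORT A =====
-- A's for-loop over an index range: returns False as soon as pred holds at an index.
-- (The `none` arm is unreachable: every index produced by range(len(s)) is in bounds.)
def hardScan (s : String) (pred : Char → Bool) : List Int → Bool
  | [] => true
  | i :: rest =>
    match PySem.Str.pyGet? s i with
    | some c => if pred c then false else hardScan s pred rest
    | none => false

def hard_to_read (s : String) : Bool :=
  if hardScan s PySem.Chars.isupper (PySem.List.pyRange 0 (PySem.Str.len s) 2) then
    hardScan s PySem.Chars.islower (PySem.List.pyRange 1 (PySem.Str.len s) 2)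
  else false

-- ===== PORT B =====
-- B's single pass over enumerate(s).
def altGo : List (Int × Char) → Bool
  | [] => true
  | (i, c) :: rest =>
    if PySem.Int.mod i 2 = 0 then
      if PySem.Chars.isupper c then false else altGo rest
    else if PySem.Chars.islower c then false else altGo rest

def hard_to_read_alt (s : String) : Bool := altGo (PySem.List.enumerate s.toList 0)

-- ===== PRECONDITION & SPEC =====
def Spec_hard_to_read (s : String) (out : Bool) : Prop := out = hard_to_read_alt s
instance (s : String) (out : Bool) : Decidable (Spec_hard_to_read s out) := by unfold Spec_hard_to_read; infer_instance

-- ===== CLAIM (what is proved, stated in full; the proofs are below) =====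
def Claim_equal_hard_to_read : Prop := ∀ (s : String), Dom_hard_to_read s → Spec_hard_to_read s (hard_to_read s)

-- ===== LEMMAS AND PROOFS =====
theorem hardScan_eq_all (s : String) (pred : Char → Bool) (idxs : List Int) :
    hardScan s pred idxs =
      idxs.all (fun i => match PySem.Str.pyGet? s i with
        | some c => !pred c
        | none => false) := by
  induction idxs with
  | nil => rfl
  | cons i rest ih =>
    simp only [hardScan, List.all_cons]
    cases h : PySem.Str.pyGet? s i with
    | none => simp
    | some c => cases hp : pred c <;> simp [ih, hp]

theorem fmod_two_eq_zero_iff (i : Int) : PySem.Int.mod i 2 = 0 ↔ 2 ∣ i := by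
  unfold PySem.Int.mod
  rw [Int.fmod_eq_emod]
  have : ((0:Int) ≤ 2 ∨ 2 ∣ i) := Or.inl (by norm_num)
  rw [if_pos this]
  omega

theorem altGo_eq_all (l : List (Int × Char)) :
    altGo l = l.all (fun p =>
      if 2 ∣ p.1 then !PySem.Chars.isupper p.2 else !PySem.Chars.islower p.2) := by
  induction l with
  | nil => rfl
  | cons p rest ih =>
    obtain ⟨i, c⟩ := p
    simp only [altGo, List.all_cons, ih, fmod_two_eq_zero_iff]
    by_cases h : (2:Int) ∣ i
    · cases hu : PySem.Chars.isupper c <;> simp [h]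
    · cases hl : PySem.Chars.islower c <;> simp [h]

theorem pyGet_some (s : String) (k : Nat) (hk : k < s.toList.length) :
    PySem.Str.pyGet? s (k : Int) = some (s.toList[k]'hk) := by
  rw [PySem.Str.pyGet?_natCast, List.getElem?_eq_getElem hk]

theorem main_eq (s : String) : hard_to_read s = hard_to_read_alt s := by
  unfold hard_to_read hard_to_read_alt
  rw [hardScan_eq_all, hardScan_eq_all, altGo_eq_all]
  have hlen : PySem.Str.len s = (s.toList.length : Int) := rfl
  simp only [hlen]
  rw [Bool.eq_iff_iff]
  constructor
  · intro h
    by_cases hA : ((PySem.List.pyRange 0 ((s.toList.length : Int)) 2).all (fun i =>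
        match PySem.Str.pyGet? s i with
        | some c => !PySem.Chars.isupper c
        | none => false)) = true
    swap
    · rw [if_neg hA] at h
      exact absurd h (by simp)
    rw [if_pos hA] at h
    rw [List.all_eq_true]
    intro p hp
    obtain ⟨k, hk, rfl⟩ := (PySem.List.mem_enumerate_iff _ _ _).mp hp
    have hcast : ((k : Int) < ((s.toList.length : Int))) := by omega
    by_cases hpar : (2:Int) ∣ (k : Int)
    · have hx := List.all_eq_true.mp hA ((k : Int)) (by
        rw [PySem.List.mem_pyRange_iff_of_pos (by norm_num)]
        exact ⟨by omega, hcast, by simpa using hpar⟩)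
      rw [pyGet_some s k hk] at hx
      simp only [zero_add, if_pos hpar]
      simpa using hx
    · have hx := List.all_eq_true.mp h ((k : Int)) (by
        rw [PySem.List.mem_pyRange_iff_of_pos (by norm_num)]
        refine ⟨by omega, hcast, by omega⟩)
      rw [pyGet_some s k hk] at hx
      simp only [zero_add, if_neg hpar]
      simpa using hx
  · intro h
    have key : ∀ i : Int, 0 ≤ i → i < (s.toList.length : Int) →
        (if 2 ∣ i then !PySem.Chars.isupper (s.toList.getD i.toNat ' ')
         else !PySem.Chars.islower (s.toList.getD i.toNat ' ')) = true := by
      intro i h0 hlt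
      have hk : i.toNat < s.toList.length := by omega
      rw [List.getD_eq_getElem s.toList ' ' hk]
      have hmem : ((i.toNat : Int), s.toList[i.toNat]'hk) ∈ PySem.List.enumerate s.toList 0 := by
        rw [PySem.List.mem_enumerate_iff]
        exact ⟨i.toNat, hk, by simp⟩
      have hx := List.all_eq_true.mp h _ hmem
      have hi : ((i.toNat : Int)) = i := by omega
      rw [hi] at hx
      simpa using hx
    have h1 : ((PySem.List.pyRange 0 ((s.toList.length : Int)) 2).all (fun i =>
        match PySem.Str.pyGet? s i with
        | some c => !PySem.Chars.isupper c
        | none => false)) = true := by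
      rw [List.all_eq_true]
      intro i hi
      rw [PySem.List.mem_pyRange_iff_of_pos (by norm_num)] at hi
      obtain ⟨ha, hb, hd⟩ := hi
      have hk : i.toNat < s.toList.length := by omega
      have hi' : ((i.toNat : Int)) = i := by omega
      rw [← hi', pyGet_some s i.toNat hk]
      have hx := key i ha hb
      rw [if_pos (by omega : (2:Int) ∣ i), List.getD_eq_getElem s.toList ' ' hk] at hx
      simpa using hx
    have h2 : ((PySem.List.pyRange 1 ((s.toList.length : Int)) 2).all (fun i =>
        match PySem.Str.pyGet? s i with
        | some c => !PySem.Chars.islower c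
        | none => false)) = true := by
      rw [List.all_eq_true]
      intro i hi
      rw [PySem.List.mem_pyRange_iff_of_pos (by norm_num)] at hi
      obtain ⟨ha, hb, hd⟩ := hi
      have hk : i.toNat < s.toList.length := by omega
      have hi' : ((i.toNat : Int)) = i := by omega
      rw [← hi', pyGet_some s i.toNat hk]
      have hx := key i (by omega) hb
      rw [if_neg (by omega : ¬ (2:Int) ∣ i), List.getD_eq_getElem s.toList ' ' hk] at hx
      simpa using hx
    rw [if_pos h1]
    exact h2

-- ===== VERDICT (by name: the statement is the Claim_ definition above) =====
theorem hard_to_read_spec : Claim_equal_hard_to_read := by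
  intro s _
  unfold Spec_hard_to_read
  exact main_eq s
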